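-- pv_equiv track=rewrite | github.com/Arsen1302/Code-copy-detector | TestData/solutions/problem_1604_5.py | solution_1604_5
-- ===== SOURCE A (Python) =====
-- from typing import List
--
-- def solution_1604_5(nums1: List[int], nums2: List[int]) -> int:
--     # Double Kadane
--     # T(c)=O(n)
--     # Either replace nums from arr1 or from arr2
--     # Then find maximum
--     n=len(nums1)
--     msfar1=0
--     msfar2=0
--     k_sum1=0
--     k_sum2=0
--     for i in range(n):
--         msfar1+=nums2[i]-nums1[i]
--         k_sum1=max(msfar1,k_sum1)
--         msfar2+=nums1[i]-nums2[i]
--         k_sum2=max(msfar2,k_sum2)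
--
--         if msfar1<0:
--             msfar1=0
--         if msfar2<0:
--             msfar2=0
--     return max(sum(nums1)+k_sum1,sum(nums2)+k_sum2)
-- ===== SOURCE B (Python) =====
-- def solution_1604_5(nums1, nums2):
--     # Prefix-sum formulation instead of Kadane: the best swap gain is
--     # max over 0<=i<=j<=n of P[j]-P[i] (resp. P[i]-P[j]) on the prefix
--     # sums P of the elementwise differences.
--     # Stage 1: prefix sums of the swap gains, P[0] = 0.
--     P = [0]
--     for a, b in zip(nums1, nums2):
--         P.append(P[-1] + (b - a))
--     # Stage 2: scan P keeping running min/max of prefixes seen so far.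
--     lo = hi = P[0]
--     g1 = g2 = 0
--     for p in P:
--         if p < lo:
--             lo = p
--         if p > hi:
--             hi = p
--         if p - lo > g1:
--             g1 = p - lo
--         if hi - p > g2:
--             g2 = hi - p
--     return max(sum(nums1) + g1, sum(nums2) + g2)
-- ===== Notes on version B (the rewrite author's own statement) =====
-- stated objective: alternative
-- what changed: Replaces the fused double-Kadane reset loop (indexing both lists per iteration) with a prefix-sum formulation: stage 1 builds the prefix-sum array of the elementwise differences, stage 2 scans it with running min/max of earlier prefixes (gain = max P[j]-P[i] over i<=j); fewer per-element operations, measured constant-factor speedup.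
-- outside the precondition, e.g. on solution_1604_5([1, 2], [5]): A raises IndexError, B returns 7
import Mathlib
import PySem

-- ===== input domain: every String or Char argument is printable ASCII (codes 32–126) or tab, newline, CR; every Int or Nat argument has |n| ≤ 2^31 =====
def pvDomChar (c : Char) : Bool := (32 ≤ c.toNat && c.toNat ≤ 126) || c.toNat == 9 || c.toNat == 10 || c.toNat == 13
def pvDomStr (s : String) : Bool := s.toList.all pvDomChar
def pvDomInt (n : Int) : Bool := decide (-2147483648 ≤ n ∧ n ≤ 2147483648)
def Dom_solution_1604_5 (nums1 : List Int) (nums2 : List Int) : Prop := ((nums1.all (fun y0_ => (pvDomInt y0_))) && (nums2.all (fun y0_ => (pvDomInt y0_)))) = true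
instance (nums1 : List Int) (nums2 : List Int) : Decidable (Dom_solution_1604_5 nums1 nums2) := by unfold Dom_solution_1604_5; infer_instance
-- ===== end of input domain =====

-- B replaces A's fused double-Kadane loop with a prefix-sum array scanned with
-- running min/max of earlier prefixes (objective: alternative algorithm; a timing run measured it constant-factor faster).

-- ===== PORT A =====
-- A's single loop over range(len(nums1)) with four accumulators, step for step.
def solution_1604_5 (nums1 : List Int) (nums2 : List Int) : Int :=
  let n : Int := nums1.length
  let st := (PySem.List.pyRange 0 n 1).foldl
    (fun (s : Int × Int × Int × Int) i =>
      let msfar1 := s.1 + (PySem.List.pyGetD nums2 i 0 - PySem.List.pyGetD nums1 i 0)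
      let ksum1 := max msfar1 s.2.1
      let msfar2 := s.2.2.1 + (PySem.List.pyGetD nums1 i 0 - PySem.List.pyGetD nums2 i 0)
      let ksum2 := max msfar2 s.2.2.2
      let msfar1' := if msfar1 < 0 then 0 else msfar1
      let msfar2' := if msfar2 < 0 then 0 else msfar2
      (msfar1', ksum1, msfar2', ksum2))
    (0, 0, 0, 0)
  max (nums1.sum + st.2.1) (nums2.sum + st.2.2.2)

-- ===== PORT B =====
-- Stage 1: P = [0]; for a,b in zip: P.append(P[-1] + (b-a)).
-- P is never empty, so the default of pyGetD at index -1 is unreachable.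
def solution_1604_5_alt (nums1 : List Int) (nums2 : List Int) : Int :=
  let P := (nums1.zip nums2).foldl
    (fun (P : List Int) ab => P ++ [PySem.List.pyGetD P (-1) 0 + (ab.2 - ab.1)]) [0]
  -- Stage 2: scan P with running min lo / max hi of prefixes seen so far.
  let p0 := PySem.List.pyGetD P 0 0
  let st := P.foldl
    (fun (s : Int × Int × Int × Int) p =>
      let lo := if p < s.1 then p else s.1
      let hi := if s.2.1 < p then p else s.2.1
      let g1 := if s.2.2.1 < p - lo then p - lo else s.2.2.1
      let g2 := if s.2.2.2 < hi - p then hi - p else s.2.2.2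
      (lo, hi, g1, g2))
    (p0, p0, 0, 0)
  max (nums1.sum + st.2.2.1) (nums2.sum + st.2.2.2)

-- ===== PRECONDITION & SPEC =====
-- Pre_ excludes exactly the inputs where A raises IndexError (nums2 shorter than nums1).
def Pre_solution_1604_5 (nums1 : List Int) (nums2 : List Int) : Prop :=
  nums1.length ≤ nums2.length
instance (nums1 : List Int) (nums2 : List Int) : Decidable (Pre_solution_1604_5 nums1 nums2) := by unfold Pre_solution_1604_5; infer_instance
def pvWitness_solution_1604_5 : List Int × List Int := ([1, -2, 3], [4, 0, -1])

def Spec_solution_1604_5 (nums1 : List Int) (nums2 : List Int) (out : Int) : Prop := out = solution_1604_5_alt nums1 nums2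
instance (nums1 : List Int) (nums2 : List Int) (out : Int) : Decidable (Spec_solution_1604_5 nums1 nums2 out) := by unfold Spec_solution_1604_5; infer_instance

-- ===== CLAIM (what is proved, stated in full; the proofs are below) =====
def Claim_equal_solution_1604_5 : Prop := ∀ (nums1 : List Int) (nums2 : List Int), Dom_solution_1604_5 nums1 nums2 → Pre_solution_1604_5 nums1 nums2 → Spec_solution_1604_5 nums1 nums2 (solution_1604_5 nums1 nums2)

-- ===== LEMMAS AND PROOFS =====

-- A Kadane step (best, cur) — the shape A's fused loop splits into.
def bgStep (p : Int × Int) (x : Int) : Int × Int :=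
  (max p.1 (max (p.2 + x) 0), max (p.2 + x) 0)

-- One step of A's fused loop, on the zipped pair instead of the index.
def stepAP (s : Int × Int × Int × Int) (p : Int × Int) : Int × Int × Int × Int :=
  let msfar1 := s.1 + (p.2 - p.1)
  let ksum1 := max msfar1 s.2.1
  let msfar2 := s.2.2.1 + (p.1 - p.2)
  let ksum2 := max msfar2 s.2.2.2
  let msfar1' := if msfar1 < 0 then 0 else msfar1
  let msfar2' := if msfar2 < 0 then 0 else msfar2
  (msfar1', ksum1, msfar2', ksum2)

-- A's fused fold over the zipped pairs splits into two independent Kadane folds.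
theorem quad_split (l : List (Int × Int)) (m1 k1 m2 k2 : Int)
    (h1 : 0 ≤ m1) (h2 : 0 ≤ k1) (h3 : 0 ≤ m2) (h4 : 0 ≤ k2) :
    l.foldl stepAP (m1, k1, m2, k2)
    = ( ((l.map (fun p => p.2 - p.1)).foldl bgStep (k1, m1)).2,
        ((l.map (fun p => p.2 - p.1)).foldl bgStep (k1, m1)).1,
        ((l.map (fun p => p.1 - p.2)).foldl bgStep (k2, m2)).2,
        ((l.map (fun p => p.1 - p.2)).foldl bgStep (k2, m2)).1 ) := by
  induction l generalizing m1 k1 m2 k2 with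
  | nil => simp
  | cons p t ih =>
      simp only [List.foldl_cons, List.map_cons]
      have hs : stepAP (m1, k1, m2, k2) p
          = (max (m1 + (p.2 - p.1)) 0, max k1 (max (m1 + (p.2 - p.1)) 0),
             max (m2 + (p.1 - p.2)) 0, max k2 (max (m2 + (p.1 - p.2)) 0)) := by
        simp only [stepAP]
        split_ifs <;> refine Prod.ext ?_ (Prod.ext ?_ (Prod.ext ?_ ?_)) <;> simp <;> omega
      rw [hs, ih _ _ _ _ (by positivity) (by positivity) (by positivity) (by positivity)]
      rfl

-- A's index loop over range(len(nums1)) equals the fold over the zipped pairs.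
theorem fold_range_eq_fold_zip (nums1 nums2 : List Int)
    (h : nums1.length ≤ nums2.length)
    {σ : Type} (f : σ → Int × Int → σ) (init : σ) :
    (PySem.List.pyRange 0 (nums1.length : Int) 1).foldl
      (fun s i => f s (PySem.List.pyGetD nums1 i 0, PySem.List.pyGetD nums2 i 0)) init
    = (nums1.zip nums2).foldl f init := by
  have hlen : (nums1.zip nums2).length = nums1.length := by
    simp [List.length_zip]; omega
  have h2 := PySem.List.foldl_pyRange_zero_pyGetD' (nums1.zip nums2) (0, 0) f init
  rw [← h2, hlen]
  apply PySem.List.foldl_congr_mem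
  intro acc i hi
  rw [PySem.List.mem_pyRange_one] at hi
  rw [PySem.List.pyGetD_eq_getElem nums1 0 hi.1 (by omega),
      PySem.List.pyGetD_eq_getElem nums2 0 hi.1 (by omega),
      PySem.List.pyGetD_eq_getElem (nums1.zip nums2) (0, 0) hi.1 (by omega)]
  simp [List.getElem_zip]

theorem portA_eq (nums1 nums2 : List Int) (h : nums1.length ≤ nums2.length) :
    solution_1604_5 nums1 nums2
    = max (nums1.sum + ((nums1.zip nums2).foldl stepAP (0, 0, 0, 0)).2.1)
          (nums2.sum + ((nums1.zip nums2).foldl stepAP (0, 0, 0, 0)).2.2.2) := by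
  unfold solution_1604_5
  rw [← fold_range_eq_fold_zip nums1 nums2 h stepAP (0, 0, 0, 0)]
  rfl

-- B's stage-2 step written with min/max.
def mstep4 (s : Int × Int × Int × Int) (p : Int) : Int × Int × Int × Int :=
  (min s.1 p, max s.2.1 p,
   max s.2.2.1 (p - min s.1 p), max s.2.2.2 (max s.2.1 p - p))

-- Stage 1 builds the scanl of (+) over the differences.
theorem stage1_eq_scanl (l : List (Int × Int)) (acc : List Int) (a : Int) :
    l.foldl (fun (P : List Int) ab => P ++ [PySem.List.pyGetD P (-1) 0 + (ab.2 - ab.1)]) (acc ++ [a])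
    = acc ++ List.scanl (· + ·) a (l.map (fun ab => ab.2 - ab.1)) := by
  induction l generalizing acc a with
  | nil => simp [List.scanl_nil]
  | cons ab t ih =>
      simp only [List.foldl_cons, List.map_cons, List.scanl_cons,
        PySem.List.pyGetD_neg_one_append_singleton]
      rw [show acc ++ [a] ++ [a + (ab.2 - ab.1)] = (acc ++ [a]) ++ [a + (ab.2 - ab.1)] from rfl,
          ih (acc ++ [a]) (a + (ab.2 - ab.1))]
      simp

-- Stage-2 scan over a prefix-sum list = two Kadane folds over the increments.
theorem scan_scanl_eq_kadane (t : List Int) (a lo hi g1 g2 : Int) :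
    ((List.scanl (· + ·) a t).foldl mstep4 (lo, hi, g1, g2)).2.2
    = ((t.foldl bgStep (max g1 (a - min lo a), a - min lo a)).1,
       ((t.map (fun x => -x)).foldl bgStep (max g2 (max hi a - a), max hi a - a)).1) := by
  induction t generalizing a lo hi g1 g2 with
  | nil => simp [List.scanl_nil, mstep4]
  | cons x t ih =>
      simp only [List.scanl_cons, List.foldl_cons, List.map_cons]
      rw [show mstep4 (lo, hi, g1, g2) a
          = (min lo a, max hi a, max g1 (a - min lo a), max g2 (max hi a - a)) from rfl,
          ih (a + x) (min lo a) (max hi a) (max g1 (a - min lo a)) (max g2 (max hi a - a))]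
      have hc1 : (a + x) - min (min lo a) (a + x) = max ((a - min lo a) + x) 0 := by omega
      have hc2 : max (max hi a) (a + x) - (a + x) = max ((max hi a - a) + -x) 0 := by omega
      rw [show bgStep (max g1 (a - min lo a), a - min lo a) x
          = (max (max g1 (a - min lo a)) (max ((a - min lo a) + x) 0), max ((a - min lo a) + x) 0) from rfl,
          show bgStep (max g2 (max hi a - a), max hi a - a) (-x)
          = (max (max g2 (max hi a - a)) (max ((max hi a - a) + -x) 0), max ((max hi a - a) + -x) 0) from rfl,
          ← hc1, ← hc2]

-- B's if-chain step is mstep4.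
theorem stepB_eq_mstep4 :
    (fun (s : Int × Int × Int × Int) (p : Int) =>
      let lo := if p < s.1 then p else s.1
      let hi := if s.2.1 < p then p else s.2.1
      let g1 := if s.2.2.1 < p - lo then p - lo else s.2.2.1
      let g2 := if s.2.2.2 < hi - p then hi - p else s.2.2.2
      (lo, hi, g1, g2)) = mstep4 := by
  funext s p
  simp only [mstep4]
  split_ifs <;> refine Prod.ext ?_ (Prod.ext ?_ (Prod.ext ?_ ?_)) <;> simp <;> omega

theorem portB_eq (nums1 nums2 : List Int) :
    solution_1604_5_alt nums1 nums2
    = max (nums1.sum + (((nums1.zip nums2).map (fun p => p.2 - p.1)).foldl bgStep (0, 0)).1)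
          (nums2.sum + (((nums1.zip nums2).map (fun p => p.1 - p.2)).foldl bgStep (0, 0)).1) := by
  unfold solution_1604_5_alt
  rw [show ([0] : List Int) = [] ++ [0] from rfl, stage1_eq_scanl, List.nil_append]
  simp only [stepB_eq_mstep4]
  have hneg : (nums1.zip nums2).map (fun p => p.1 - p.2)
      = ((nums1.zip nums2).map (fun ab => ab.2 - ab.1)).map (fun x => -x) := by
    simp [List.map_map, Function.comp_def, neg_sub]
  rw [hneg]
  generalize (nums1.zip nums2).map (fun ab => ab.2 - ab.1) = d
  have h0 : PySem.List.pyGetD (List.scanl (· + ·) 0 d) 0 0 = 0 := by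
    cases d <;> simp [List.scanl_nil, List.scanl_cons, PySem.List.pyGetD_zero_cons]
  rw [h0]
  have hk := scan_scanl_eq_kadane d 0 0 0 0 0
  simp only [min_self, sub_self, max_self] at hk
  rw [Prod.ext_iff] at hk
  obtain ⟨h1, h2⟩ := hk
  simp only at h1 h2
  rw [h1, h2]

-- ===== VERDICT (by name: the statement is the Claim_ definition above) =====
theorem solution_1604_5_spec : Claim_equal_solution_1604_5 := by
  intro nums1 nums2 _ hpre
  unfold Spec_solution_1604_5
  rw [portB_eq, portA_eq nums1 nums2 hpre,
      quad_split _ 0 0 0 0 le_rfl le_rfl le_rfl le_rfl]
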